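-- pv_equiv track=rewrite | github.com/HackademINT/hackademint.github.io-legacy | writeup-scripts/2017-2018/AngstromCTF/affine/solve.py | get_coeff_list
-- ===== SOURCE A (Python) =====
-- def get_coeff_list(cipher,start,alpha):
--     """ y = a*x + b """
--     L=[]
--     for i in range(len(alpha)):
--         for j in range(len(alpha)):
--             compt=0
--             for p in range(len(start)):
--                 if (i*alpha.index(start[p])+j)%len(alpha)==alpha.index(cipher[p]):
--                     compt+=1
--             if compt==len(start):
--                 L.append([i,j])
--     return L
-- ===== SOURCE B (Python) =====
-- def get_coeff_list(cipher, start, alpha):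
--     """ y = a*x + b """
--     n = len(alpha)
--     if n == 0:
--         return []
--     if not start:
--         return [[i, j] for i in range(n) for j in range(n)]
--     xs = [alpha.index(c) for c in start]
--     ys = [alpha.index(cipher[p]) for p in range(len(start))]
--     L = []
--     for i in range(n):
--         j = (ys[0] - i * xs[0]) % n
--         if all((i * xs[p] + j) % n == ys[p] for p in range(len(start))):
--             L.append([i, j])
--     return L
-- ===== Notes on version B (the rewrite author's own statement) =====
-- stated objective: faster
-- what changed: Precomputes the index lists once and derives the intercept j = (y0 - i*x0) mod n from the first character instead of searching it, turning the n*n*m triple loop with repeated str.index into a single loop over i with an O(m) verification.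
import Mathlib
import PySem

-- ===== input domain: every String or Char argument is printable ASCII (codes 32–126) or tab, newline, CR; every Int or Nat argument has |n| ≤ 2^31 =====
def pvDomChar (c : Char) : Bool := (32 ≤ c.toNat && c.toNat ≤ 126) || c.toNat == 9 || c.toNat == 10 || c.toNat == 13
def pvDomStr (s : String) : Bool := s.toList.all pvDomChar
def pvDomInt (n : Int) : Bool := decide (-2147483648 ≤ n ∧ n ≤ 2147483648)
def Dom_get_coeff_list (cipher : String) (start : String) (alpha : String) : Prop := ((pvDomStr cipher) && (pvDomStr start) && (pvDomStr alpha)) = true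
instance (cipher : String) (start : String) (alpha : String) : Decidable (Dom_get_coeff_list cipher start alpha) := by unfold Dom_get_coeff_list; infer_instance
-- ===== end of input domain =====

-- B derives the affine intercept j from the first character instead of searching it and
-- precomputes the alphabet indices once, replacing A's triple nested loop (objective: faster).

-- ===== PORT A =====
-- inner `if` test of A at position p: none exactly where Python raises
-- (str.index → ValueError, cipher[p] → IndexError)
def pvACond (al cs ss : List Char) (i j p : Nat) : Option Bool := do
  let c ← ss[p]?
  let x ← PySem.List.index? al c
  let cc ← cs[p]?
  let y ← PySem.List.index? al cc
  pure (PySem.Int.mod ((i : Int) * (x : Int) + (j : Int)) (al.length : Int) == (y : Int))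

def get_coeff_list (cipher : String) (start : String) (alpha : String) : List (List Int) :=
  let al := alpha.toList
  let cs := cipher.toList
  let ss := start.toList
  let res : Option (List (List Int)) :=
    (List.range al.length).foldlM (fun L i =>
      (List.range al.length).foldlM (fun L j => do
        let compt ← (List.range ss.length).foldlM (fun compt p => do
            let b ← pvACond al cs ss i j p
            pure (if b then compt + 1 else compt)) (0 : Nat)
        pure (if compt = ss.length then L ++ [[(i : Int), (j : Int)]] else L)) L)
      ([] : List (List Int))
  res.getD []   -- `none` exactly where the Python raises (those inputs are outside Pre_)

-- ===== PORT B =====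
def get_coeff_list_alt (cipher : String) (start : String) (alpha : String) : List (List Int) :=
  let al := alpha.toList
  let n : Int := (al.length : Int)
  if al.length = 0 then []
  else if start.toList.length = 0 then
    (List.range al.length).flatMap (fun (i : Nat) => (List.range al.length).map (fun (j : Nat) => [(i : Int), (j : Int)]))
  else
    match start.toList.mapM (PySem.List.index? al),
          (List.range start.toList.length).mapM (fun p => cipher.toList[p]? >>= PySem.List.index? al) with
    | some xs, some ys =>
      (List.range al.length).foldl (fun (L : List (List Int)) (i : Nat) =>
        let j : Int := PySem.Int.mod ((ys.getD 0 0 : Int) - (i : Int) * (xs.getD 0 0 : Int)) n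
        if (List.range start.toList.length).all
             (fun (p : Nat) => PySem.Int.mod ((i : Int) * (xs.getD p 0 : Int) + j) n == (ys.getD p 0 : Int)) then
          L ++ [[(i : Int), j]]
        else L) []
    | _, _ => []   -- Python raises while building xs/ys (outside Pre_)

-- ===== PRECONDITION & SPEC =====
-- Pre_ excludes exactly the inputs where A raises: with a nonempty alphabet, every character of
-- start and of the first len(start) characters of cipher must occur in alpha (else ValueError),
-- and cipher must be at least as long as start (else IndexError).
def Pre_get_coeff_list (cipher : String) (start : String) (alpha : String) : Prop :=
  alpha.toList = [] ∨
  (start.toList.length ≤ cipher.toList.length ∧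
   start.toList.all (fun c => alpha.toList.contains c) = true ∧
   (cipher.toList.take start.toList.length).all (fun c => alpha.toList.contains c) = true)
instance (cipher : String) (start : String) (alpha : String) : Decidable (Pre_get_coeff_list cipher start alpha) := by
  unfold Pre_get_coeff_list; infer_instance

def pvWitness_get_coeff_list : String × String × String := ("db", "ab", "abcd")

def Spec_get_coeff_list (cipher : String) (start : String) (alpha : String) (out : List (List Int)) : Prop := out = get_coeff_list_alt cipher start alpha
instance (cipher : String) (start : String) (alpha : String) (out : List (List Int)) : Decidable (Spec_get_coeff_list cipher start alpha out) := by unfold Spec_get_coeff_list; infer_instance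

-- ===== CLAIM (what is proved, stated in full; the proofs are below) =====
def Claim_equal_get_coeff_list : Prop := ∀ (cipher : String) (start : String) (alpha : String), Dom_get_coeff_list cipher start alpha → Pre_get_coeff_list cipher start alpha → Spec_get_coeff_list cipher start alpha (get_coeff_list cipher start alpha)

-- ===== LEMMAS AND PROOFS =====

-- Option.foldlM reduces to a pure foldl when every step returns `some`.
theorem pvFoldlM_eq_foldl {α β : Type} (l : List α) (f : β → α → Option β) (g : β → α → β)
    (h : ∀ b : β, ∀ x ∈ l, f b x = some (g b x)) (a : β) :
    l.foldlM f a = some (l.foldl g a) := by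
  induction l generalizing a with
  | nil => rfl
  | cons x t ih =>
      rw [List.foldlM_cons, h a x (List.mem_cons_self)]
      exact ih (fun b y hy => h b y (List.mem_cons_of_mem _ hy)) (g a x)

-- mapM over Option succeeds with the pointwise defaults when no step is none.
theorem pvMapM_eq_map {α : Type} (l : List α) (f : α → Option Nat)
    (h : ∀ x ∈ l, (f x).isSome) :
    l.mapM f = some (l.map (fun x => (f x).getD 0)) := by
  induction l with
  | nil => rfl
  | cons x t ih =>
      obtain ⟨v, hv⟩ := Option.isSome_iff_exists.mp (h x List.mem_cons_self)
      simp [List.mapM_cons, hv, ih (fun y hy => h y (List.mem_cons_of_mem _ hy))]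

theorem pvFmod_pos_eq_emod (a n : Int) (h : 0 < n) : PySem.Int.mod a n = a % n := by
  unfold PySem.Int.mod
  rw [Int.fmod_eq_emod]
  simp [Or.inl h.le]

-- counting loop = countP
theorem pvFoldl_count {α : Type} (l : List α) (p : α → Bool) (a : Nat) :
    l.foldl (fun c x => if p x then c + 1 else c) a = a + l.countP p := by
  induction l generalizing a with
  | nil => simp
  | cons x t ih =>
      by_cases hx : p x
      · simp [hx, ih]; omega
      · simp [hx, ih]

-- a filter over range n whose predicate forces a single value
theorem pvFilter_range_single (n t : Nat) (p : Nat → Bool) (ht : t < n)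
    (h : ∀ j, j < n → p j = true → j = t) :
    (List.range n).filter p = if p t then [t] else [] := by
  by_cases hpt : p t = true
  · rw [if_pos hpt]
    have hcongr : ∀ j ∈ List.range n, p j = (j == t) := by
      intro j hj
      by_cases hpj : p j = true
      · rw [hpj, h j (List.mem_range.mp hj) hpj, beq_self_eq_true]
      · have hf : p j = false := by simpa using hpj
        have hne : j ≠ t := fun hjt => hpj (hjt ▸ hpt)
        rw [hf]
        exact (beq_eq_false_iff_ne.mpr hne).symm
    rw [List.filter_congr hcongr]
    rw [List.filter_beq t, List.count_eq_one_of_mem (List.nodup_range) (List.mem_range.mpr ht)]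
    rfl
  · rw [if_neg hpt, List.filter_eq_nil_iff]
    intro j hj hp
    exact hpt (h j (List.mem_range.mp hj) hp ▸ hp)

-- the resolved Boolean test of A at position p (all options discharged), used only in the proofs
def pvCond (al cs ss : List Char) (i : Nat) (j : Int) (p : Nat) : Bool :=
  PySem.Int.mod ((i : Int) * (((PySem.List.index? al (ss.getD p ' ')).getD 0 : Nat) : Int) + j)
      (al.length : Int)
    == (((PySem.List.index? al (cs.getD p ' ')).getD 0 : Nat) : Int)

-- the intercept B derives from the first character
def pvJ0 (al cs ss : List Char) (i : Nat) : Int :=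
  PySem.Int.mod ((((PySem.List.index? al (cs.getD 0 ' ')).getD 0 : Nat) : Int)
      - (i : Int) * (((PySem.List.index? al (ss.getD 0 ' ')).getD 0 : Nat) : Int))
    (al.length : Int)

theorem pvSomeBind {α β : Type} (a : α) (f : α → Option β) : (some a >>= f) = f a := rfl

theorem pvACond_eq (al cs ss : List Char)
    (hlen : ss.length ≤ cs.length)
    (hstart : ∀ c ∈ ss, c ∈ al)
    (hcip : ∀ c ∈ cs.take ss.length, c ∈ al)
    (i j p : Nat) (hp : p < ss.length) :
    pvACond al cs ss i j p = some (pvCond al cs ss i (j : Int) p) := by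
  have hpc : p < cs.length := lt_of_lt_of_le hp hlen
  have h1 : ss[p]? = some (ss.getD p ' ') := by
    rw [List.getElem?_eq_getElem hp, List.getD_eq_getElem ss ' ' hp]
  have h2 : cs[p]? = some (cs.getD p ' ') := by
    rw [List.getElem?_eq_getElem hpc, List.getD_eq_getElem cs ' ' hpc]
  have hmem1 : ss.getD p ' ' ∈ al := by
    rw [List.getD_eq_getElem ss ' ' hp]; exact hstart _ (List.getElem_mem hp)
  have hmem2 : cs.getD p ' ' ∈ al := by
    rw [List.getD_eq_getElem cs ' ' hpc]
    refine hcip _ ?_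
    have hpt : p < (cs.take ss.length).length := by simp; omega
    have hgt : (cs.take ss.length)[p] = cs[p] := List.getElem_take
    exact hgt ▸ List.getElem_mem hpt
  obtain ⟨x, hx⟩ := Option.isSome_iff_exists.mp ((PySem.List.index?_isSome_iff al _).mpr hmem1)
  obtain ⟨y, hy⟩ := Option.isSome_iff_exists.mp ((PySem.List.index?_isSome_iff al _).mpr hmem2)
  unfold pvACond pvCond
  rw [h1, pvSomeBind, hx, pvSomeBind, h2, pvSomeBind, hy, pvSomeBind]
  rfl

theorem pvAval (cipher start alpha : String)
    (hlen : start.toList.length ≤ cipher.toList.length)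
    (hstart : ∀ c ∈ start.toList, c ∈ alpha.toList)
    (hcip : ∀ c ∈ cipher.toList.take start.toList.length, c ∈ alpha.toList) :
    get_coeff_list cipher start alpha =
      (List.range alpha.toList.length).foldl (fun (L : List (List Int)) (i : Nat) =>
        (List.range alpha.toList.length).foldl (fun (L : List (List Int)) (j : Nat) =>
          if (List.range start.toList.length).countP
               (pvCond alpha.toList cipher.toList start.toList i (j : Int))
             = start.toList.length
          then L ++ [[(i : Int), (j : Int)]] else L) L) [] := by
  have hA := pvACond_eq alpha.toList cipher.toList start.toList hlen hstart hcip
  show ((List.range alpha.toList.length).foldlM (fun (L : List (List Int)) (i : Nat) =>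
      (List.range alpha.toList.length).foldlM (fun (L : List (List Int)) (j : Nat) => do
        let compt ← (List.range start.toList.length).foldlM (fun (compt : Nat) (p : Nat) => do
            let b ← pvACond alpha.toList cipher.toList start.toList i j p
            pure (if b then compt + 1 else compt)) (0 : Nat)
        pure (if compt = start.toList.length then L ++ [[(i : Int), (j : Int)]] else L)) L)
      ([] : List (List Int))).getD [] = _
  rw [pvFoldlM_eq_foldl (List.range alpha.toList.length) _
      (fun (L : List (List Int)) (i : Nat) =>
        (List.range alpha.toList.length).foldl (fun (L : List (List Int)) (j : Nat) =>
          if (List.range start.toList.length).countP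
               (pvCond alpha.toList cipher.toList start.toList i (j : Int))
             = start.toList.length
          then L ++ [[(i : Int), (j : Int)]] else L) L) ?_]
  · rfl
  intro L i _
  rw [pvFoldlM_eq_foldl (List.range alpha.toList.length) _
      (fun (L : List (List Int)) (j : Nat) =>
          if (List.range start.toList.length).countP
               (pvCond alpha.toList cipher.toList start.toList i (j : Int))
             = start.toList.length
          then L ++ [[(i : Int), (j : Int)]] else L) ?_]
  intro L j _
  have hin : (List.range start.toList.length).foldlM (fun (compt : Nat) (p : Nat) => do
        let b ← pvACond alpha.toList cipher.toList start.toList i j p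
        pure (if b then compt + 1 else compt)) (0 : Nat)
      = some ((List.range start.toList.length).countP
               (pvCond alpha.toList cipher.toList start.toList i (j : Int))) := by
    rw [pvFoldlM_eq_foldl (List.range start.toList.length) _
        (fun (compt : Nat) (p : Nat) =>
          if pvCond alpha.toList cipher.toList start.toList i (j : Int) p
          then compt + 1 else compt) ?_]
    · rw [pvFoldl_count, Nat.zero_add]
    intro b p hp
    rw [hA i j p (List.mem_range.mp hp)]
    rfl
  rw [hin]
  rfl

theorem pvAll_congr (l : List Nat) (f g : Nat → Bool) (h : ∀ x ∈ l, f x = g x) :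
    l.all f = l.all g := by
  induction l with
  | nil => rfl
  | cons x t ih =>
      simp only [List.all_cons, h x List.mem_cons_self,
        ih (fun y hy => h y (List.mem_cons_of_mem _ hy))]

-- the inner j-loop of A collapses to the single derived intercept
theorem pvInnerLoop (al cs ss : List Char) (hal : al ≠ []) (hm : 0 < ss.length)
    (i : Nat) (L : List (List Int)) :
    (List.range al.length).foldl
      (fun (L : List (List Int)) (j : Nat) =>
        if (List.range ss.length).all (pvCond al cs ss i (j : Int)) then
          L ++ [[(i : Int), (j : Int)]]
        else L) L
    = if (List.range ss.length).all (pvCond al cs ss i (pvJ0 al cs ss i)) then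
        L ++ [[(i : Int), pvJ0 al cs ss i]]
      else L := by
  have hn : (0 : Int) < (al.length : Int) := by
    exact_mod_cast List.length_pos_iff.mpr hal
  have hj0nn : 0 ≤ pvJ0 al cs ss i := Int.fmod_nonneg_of_pos _ hn
  have hj0lt : pvJ0 al cs ss i < (al.length : Int) := Int.fmod_lt_of_pos _ hn
  have htc : ((pvJ0 al cs ss i).toNat : Int) = pvJ0 al cs ss i := Int.toNat_of_nonneg hj0nn
  have ht : (pvJ0 al cs ss i).toNat < al.length := by omega
  have huniq : ∀ j, j < al.length →
      ((List.range ss.length).all (pvCond al cs ss i (j : Int))) = true →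
      j = (pvJ0 al cs ss i).toNat := by
    intro j hj hall
    have h0 := List.all_eq_true.mp hall 0 (List.mem_range.mpr hm)
    have heq : PySem.Int.mod
        ((i : Int) * (((PySem.List.index? al (ss.getD 0 ' ')).getD 0 : Nat) : Int) + (j : Int))
        (al.length : Int)
        = (((PySem.List.index? al (cs.getD 0 ' ')).getD 0 : Nat) : Int) := by
      simpa [pvCond] using h0
    rw [pvFmod_pos_eq_emod _ _ hn] at heq
    have hgoal : pvJ0 al cs ss i = (j : Int) := by
      unfold pvJ0
      rw [pvFmod_pos_eq_emod _ _ hn, ← heq, Int.sub_emod, Int.emod_emod_of_dvd _ dvd_rfl,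
        ← Int.sub_emod]
      have h2 : (i : Int) * (((PySem.List.index? al (ss.getD 0 ' ')).getD 0 : Nat) : Int)
          + (j : Int)
          - (i : Int) * (((PySem.List.index? al (ss.getD 0 ' ')).getD 0 : Nat) : Int)
          = (j : Int) := by ring
      rw [h2, Int.emod_eq_of_lt (by positivity) (by exact_mod_cast hj)]
    omega
  rw [PySem.List.foldl_append_if
      (fun j : Nat => (List.range ss.length).all (pvCond al cs ss i (j : Int)))
      (fun j : Nat => [(i : Int), (j : Int)]) (List.range al.length) L]
  rw [pvFilter_range_single al.length (pvJ0 al cs ss i).toNat _ ht huniq]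
  rw [htc]
  by_cases hc : (List.range ss.length).all (pvCond al cs ss i (pvJ0 al cs ss i)) = true
  · rw [if_pos hc, if_pos hc, List.map_cons, List.map_nil, htc]
  · rw [if_neg hc, if_neg hc, List.map_nil, List.append_nil]

-- B's main branch in pvCond/pvJ0 form
theorem pvBval (cipher start alpha : String)
    (hal : alpha.toList ≠ [])
    (hm : 0 < start.toList.length)
    (hlen : start.toList.length ≤ cipher.toList.length)
    (hstart : ∀ c ∈ start.toList, c ∈ alpha.toList)
    (hcip : ∀ c ∈ cipher.toList.take start.toList.length, c ∈ alpha.toList) :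
    get_coeff_list_alt cipher start alpha =
      (List.range alpha.toList.length).foldl (fun (L : List (List Int)) (i : Nat) =>
        if (List.range start.toList.length).all
             (pvCond alpha.toList cipher.toList start.toList i
               (pvJ0 alpha.toList cipher.toList start.toList i)) then
          L ++ [[(i : Int), pvJ0 alpha.toList cipher.toList start.toList i]]
        else L) [] := by
  have h0 : ¬ alpha.toList.length = 0 := by
    simpa [List.length_eq_zero_iff] using hal
  have hm0 : ¬ start.toList.length = 0 := by omega
  have hxs : start.toList.mapM (PySem.List.index? alpha.toList)
      = some (start.toList.map (fun c => (PySem.List.index? alpha.toList c).getD 0)) :=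
    pvMapM_eq_map _ _ (fun c hc => (PySem.List.index?_isSome_iff _ _).mpr (hstart c hc))
  have hysSome : ∀ p ∈ List.range start.toList.length,
      ((cipher.toList[p]? >>= PySem.List.index? alpha.toList)).isSome := by
    intro p hp
    have hp' := List.mem_range.mp hp
    have hpc : p < cipher.toList.length := lt_of_lt_of_le hp' hlen
    rw [List.getElem?_eq_getElem hpc, pvSomeBind]
    refine (PySem.List.index?_isSome_iff _ _).mpr (hcip _ ?_)
    have hpt : p < (cipher.toList.take start.toList.length).length := by
      rw [List.length_take]; omega
    have hgt : (cipher.toList.take start.toList.length)[p] = cipher.toList[p] :=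
      List.getElem_take
    exact hgt ▸ List.getElem_mem hpt
  have hys : (List.range start.toList.length).mapM
        (fun p => cipher.toList[p]? >>= PySem.List.index? alpha.toList)
      = some ((List.range start.toList.length).map
          (fun p => (cipher.toList[p]? >>= PySem.List.index? alpha.toList).getD 0)) :=
    pvMapM_eq_map _ _ hysSome
  have hG : ∀ p, p < start.toList.length →
      (cipher.toList[p]? >>= PySem.List.index? alpha.toList).getD 0
      = (PySem.List.index? alpha.toList (cipher.toList.getD p ' ')).getD 0 := by
    intro p hp
    have hpc : p < cipher.toList.length := lt_of_lt_of_le hp hlen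
    rw [List.getElem?_eq_getElem hpc, pvSomeBind, List.getD_eq_getElem _ _ hpc]
  have hXD : ∀ p, p < start.toList.length →
      (start.toList.map (fun c => (PySem.List.index? alpha.toList c).getD 0)).getD p 0
      = (PySem.List.index? alpha.toList (start.toList.getD p ' ')).getD 0 := by
    intro p hp
    rw [List.getD_eq_getElem _ _ (by simpa using hp), List.getElem_map,
      List.getD_eq_getElem _ _ hp]
  have hYD : ∀ p, p < start.toList.length →
      ((List.range start.toList.length).map
          (fun p => (cipher.toList[p]? >>= PySem.List.index? alpha.toList).getD 0)).getD p 0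
      = (PySem.List.index? alpha.toList (cipher.toList.getD p ' ')).getD 0 := by
    intro p hp
    rw [List.getD_eq_getElem _ _ (by simpa using hp), List.getElem_map, List.getElem_range,
      hG p hp]
  unfold get_coeff_list_alt
  rw [if_neg h0, if_neg hm0, hxs, hys]
  dsimp only
  apply PySem.List.foldl_congr_mem
  intro L i _
  have hjeq : PySem.Int.mod
      ((((List.range start.toList.length).map
          (fun p => (cipher.toList[p]? >>= PySem.List.index? alpha.toList).getD 0)).getD 0 0 : Int)
        - (i : Int) * ((start.toList.map
            (fun c => (PySem.List.index? alpha.toList c).getD 0)).getD 0 0 : Int))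
      (alpha.toList.length : Int)
      = pvJ0 alpha.toList cipher.toList start.toList i := by
    unfold pvJ0
    rw [hYD 0 hm, hXD 0 hm]
  rw [hjeq]
  have hall : (List.range start.toList.length).all
      (fun p => PySem.Int.mod
          ((i : Int) * ((start.toList.map
              (fun c => (PySem.List.index? alpha.toList c).getD 0)).getD p 0 : Int)
            + pvJ0 alpha.toList cipher.toList start.toList i)
          (alpha.toList.length : Int)
        == (((List.range start.toList.length).map
            (fun p => (cipher.toList[p]? >>= PySem.List.index? alpha.toList).getD 0)).getD p 0 : Int))
      = (List.range start.toList.length).all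
          (pvCond alpha.toList cipher.toList start.toList i
            (pvJ0 alpha.toList cipher.toList start.toList i)) := by
    apply pvAll_congr
    intro p hp
    have hp' := List.mem_range.mp hp
    unfold pvCond
    rw [hXD p hp', hYD p hp']
  rw [hall]

theorem get_coeff_list_spec : Claim_equal_get_coeff_list := by
  intro cipher start alpha _ hpre
  unfold Spec_get_coeff_list
  by_cases hal : alpha.toList = []
  · unfold get_coeff_list get_coeff_list_alt
    rw [hal]
    rfl
  · obtain ⟨hlen, hstartB, hcipB⟩ := hpre.resolve_left hal
    have hstart : ∀ c ∈ start.toList, c ∈ alpha.toList := fun c hc => by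
      simpa using List.all_eq_true.mp hstartB c hc
    have hcip : ∀ c ∈ cipher.toList.take start.toList.length, c ∈ alpha.toList := fun c hc => by
      simpa using List.all_eq_true.mp hcipB c hc
    have h0 : ¬ alpha.toList.length = 0 := by
      simpa [List.length_eq_zero_iff] using hal
    rw [pvAval cipher start alpha hlen hstart hcip]
    by_cases hm : start.toList.length = 0
    · -- empty start: every pair [i, j] is collected on both sides
      unfold get_coeff_list_alt
      rw [if_neg h0, if_pos hm]
      rw [PySem.List.foldl_congr_mem (List.range alpha.toList.length) _
        (fun (L : List (List Int)) (i : Nat) =>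
          L ++ (List.range alpha.toList.length).map (fun (j : Nat) => [(i : Int), (j : Int)]))
        [] ?_]
      · rw [PySem.List.foldl_append_eq_flatMap
          (fun (i : Nat) => (List.range alpha.toList.length).map
            (fun (j : Nat) => [(i : Int), (j : Int)])) (List.range alpha.toList.length) []]
        rfl
      intro L i _
      rw [PySem.List.foldl_congr_mem (List.range alpha.toList.length) _
        (fun (L : List (List Int)) (j : Nat) => L ++ [[(i : Int), (j : Int)]]) L ?_]
      · exact PySem.List.foldl_append_singleton_eq_map _ _ _
      intro L' j _
      rw [if_pos]
      rw [hm]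
      simp
    · have hmpos : 0 < start.toList.length := Nat.pos_of_ne_zero hm
      rw [pvBval cipher start alpha hal hmpos hlen hstart hcip]
      apply PySem.List.foldl_congr_mem
      intro L i _
      rw [PySem.List.foldl_congr_mem (List.range alpha.toList.length) _
        (fun (L : List (List Int)) (j : Nat) =>
          if (List.range start.toList.length).all
               (pvCond alpha.toList cipher.toList start.toList i (j : Int)) then
            L ++ [[(i : Int), (j : Int)]]
          else L) L ?_]
      · exact pvInnerLoop alpha.toList cipher.toList start.toList hal hmpos i L
      intro L' j _
      refine if_congr ?_ rfl rfl
      constructor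
      · intro hcnt
        refine List.all_eq_true.mpr (List.countP_eq_length.mp ?_)
        rw [List.length_range]
        exact hcnt
      · intro hall
        have hc := List.countP_eq_length.mpr (List.all_eq_true.mp hall)
        rw [List.length_range] at hc
        exact hc
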